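-- pv_equiv track=rewrite | github.com/QuentinDeHaes/Unboundedness-for-1-VASS | helper_functions.py | cleanup_non_cyclables
-- ===== SOURCE A (Python) =====
-- def cleanup_non_cyclables(non_cyclables, cyclabe_increase: int, minimal_cyclable: int):
--     """
--     clean the non_cyclables so that each chain has it's non-allowed values ordered
--     :param non_cyclables: the disequalities whether we allow taking the cycle
--     :param cyclabe_increase: the amount with which the countervalue increased when taking the cycle
--     :param minimal_cyclable: the minimal countervalue to take the value
--     :return: a dict where each chain has it's own bounded value
--     O(V²) if maximum amount of disequalities per node is fixed because of sort
--     # the amount of chains that are bounded is also limited by the minimum between the positive_cycle_value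
--     # and the amount of disequalities, which makes us bounded by O(V) as long as
--     # the amount of disequalities is fixed
--     """
--     cleaned_non_cyclables = dict()
--     for non_cyclable in non_cyclables:
--
--         # values not cyclable because they would cause negative counter need not be considered
--         if non_cyclable < minimal_cyclable:
--             continue
--
--         value = (non_cyclable % cyclabe_increase)  # check which chain we need to consider
--
--         if value in cleaned_non_cyclables:  # check wether th chain already has values or not
--
--             cleaned_non_cyclables[value].append(non_cyclable)
--
--         else:
--             cleaned_non_cyclables[value] = [non_cyclable]
--
--         for key in cleaned_non_cyclables:  # in the end, we need all values in a sorted order, so we'll simply sort at the end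
--             cleaned_non_cyclables[key] = sorted(cleaned_non_cyclables[key])
--
--     return cleaned_non_cyclables
-- ===== SOURCE B (Python) =====
-- def cleanup_non_cyclables(non_cyclables, cyclabe_increase: int, minimal_cyclable: int):
--     # one pass to group, one sort per chain at the end (A re-sorts every chain on every element)
--     groups = {}
--     for n in non_cyclables:
--         if n >= minimal_cyclable:
--             groups.setdefault(n % cyclabe_increase, []).append(n)
--     return {k: sorted(v) for k, v in groups.items()}
-- ===== Notes on version B (the rewrite author's own statement) =====
-- stated objective: faster
-- what changed: A re-sorts every chain after each inserted element inside the main loop; B groups the kept values into chains in one pass and sorts each chain exactly once at the end.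
import Mathlib
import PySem

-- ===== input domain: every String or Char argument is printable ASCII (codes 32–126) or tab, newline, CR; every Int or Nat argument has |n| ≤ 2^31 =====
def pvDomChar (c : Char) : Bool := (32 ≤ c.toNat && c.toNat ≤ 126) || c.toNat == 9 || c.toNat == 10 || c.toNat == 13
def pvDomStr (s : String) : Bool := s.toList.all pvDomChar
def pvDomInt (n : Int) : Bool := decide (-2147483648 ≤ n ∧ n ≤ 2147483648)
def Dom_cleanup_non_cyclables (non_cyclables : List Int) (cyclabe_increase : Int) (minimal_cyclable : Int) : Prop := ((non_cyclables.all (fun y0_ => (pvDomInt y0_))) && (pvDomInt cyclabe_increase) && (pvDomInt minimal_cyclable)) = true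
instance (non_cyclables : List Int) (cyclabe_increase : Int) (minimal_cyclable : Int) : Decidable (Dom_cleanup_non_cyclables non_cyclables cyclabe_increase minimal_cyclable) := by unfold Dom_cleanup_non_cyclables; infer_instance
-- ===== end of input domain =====

-- B groups the kept values into chains in one pass and sorts each chain once at the
-- end, where A re-sorts every chain after every inserted element (faster).

-- ===== PORT A =====
def cleanup_non_cyclables (non_cyclables : List Int) (cyclabe_increase : Int) (minimal_cyclable : Int) : List (Int × List Int) :=
  (non_cyclables.foldl (fun d non_cyclable =>
      if non_cyclable < minimal_cyclable then d
      else
        let value := PySem.Int.mod non_cyclable cyclabe_increase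
        let d' := if d.contains value then d.modify value [] (fun xs => xs ++ [non_cyclable])
                  else d.insert value [non_cyclable]
        -- 'for key in cleaned_non_cyclables: cleaned_non_cyclables[key] = sorted(...)'
        d'.keys.foldl (fun dd key => dd.insert key (PySem.List.sorted (dd.getD key []) (fun x => x) false)) d')
    PySem.Dict.empty).items

-- ===== PORT B =====
def cleanup_non_cyclables_alt (non_cyclables : List Int) (cyclabe_increase : Int) (minimal_cyclable : Int) : List (Int × List Int) :=
  let groups := non_cyclables.foldl (fun d n =>
      if minimal_cyclable ≤ n then d.modify (PySem.Int.mod n cyclabe_increase) [] (fun xs => xs ++ [n])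
      else d)
    PySem.Dict.empty
  groups.items.map (fun p => (p.1, PySem.List.sorted p.2 (fun x => x) false))

-- ===== PRECONDITION & SPEC =====
-- Pre_ excludes exactly the inputs where Python's '%' raises ZeroDivisionError:
-- cyclabe_increase = 0 while some element reaches the modulo (i.e. is ≥ minimal_cyclable).
def Pre_cleanup_non_cyclables (non_cyclables : List Int) (cyclabe_increase : Int) (minimal_cyclable : Int) : Prop :=
  cyclabe_increase ≠ 0 ∨ ∀ x ∈ non_cyclables, x < minimal_cyclable
instance (non_cyclables : List Int) (cyclabe_increase : Int) (minimal_cyclable : Int) : Decidable (Pre_cleanup_non_cyclables non_cyclables cyclabe_increase minimal_cyclable) := by unfold Pre_cleanup_non_cyclables; infer_instance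
def pvWitness_cleanup_non_cyclables : List Int × Int × Int := ([7, 3, 10, 4, -2], 3, 0)
def Spec_cleanup_non_cyclables (non_cyclables : List Int) (cyclabe_increase : Int) (minimal_cyclable : Int) (out : List (Int × List Int)) : Prop := out = cleanup_non_cyclables_alt non_cyclables cyclabe_increase minimal_cyclable
instance (non_cyclables : List Int) (cyclabe_increase : Int) (minimal_cyclable : Int) (out : List (Int × List Int)) : Decidable (Spec_cleanup_non_cyclables non_cyclables cyclabe_increase minimal_cyclable out) := by unfold Spec_cleanup_non_cyclables; infer_instance

-- ===== CLAIM (what is proved, stated in full; the proofs are below) =====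
def Claim_equal_cleanup_non_cyclables : Prop := ∀ (non_cyclables : List Int) (cyclabe_increase : Int) (minimal_cyclable : Int), Dom_cleanup_non_cyclables non_cyclables cyclabe_increase minimal_cyclable → Pre_cleanup_non_cyclables non_cyclables cyclabe_increase minimal_cyclable → Spec_cleanup_non_cyclables non_cyclables cyclabe_increase minimal_cyclable (cleanup_non_cyclables non_cyclables cyclabe_increase minimal_cyclable)

-- ===== LEMMAS AND PROOFS =====

-- the relation maintained between A's dict (sorted chains) and B's dict (raw chains)
def pvInv (dA dB : PySem.Dict Int (List Int)) : Prop :=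
  dA.keys = dB.keys ∧ dB.keys.Nodup ∧
    ∀ k, dA.getD k [] = PySem.List.sorted (dB.getD k []) (fun x => x) false

lemma pvNotMem_contains_false (d : PySem.Dict Int (List Int)) (k : Int) (h : k ∉ d.keys) :
    d.contains k = false := by
  cases hc : d.contains k
  · rfl
  · exact absurd ((PySem.Dict.contains_iff_mem_keys d k).mp hc) h

-- A's per-element sort loop: getD after the loop
lemma pvSortLoop_getD (ks : List Int) (d : PySem.Dict Int (List Int)) (hks : ks.Nodup) (k : Int) :
    (ks.foldl (fun dd key => dd.insert key (PySem.List.sorted (dd.getD key []) (fun x => x) false)) d).getD k []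
      = if k ∈ ks then PySem.List.sorted (d.getD k []) (fun x => x) false else d.getD k [] := by
  induction ks generalizing d with
  | nil => simp
  | cons k' rest ih =>
    simp only [List.foldl_cons]
    rcases List.nodup_cons.mp hks with ⟨hk', hrest⟩
    rw [ih _ hrest]
    by_cases hmem : k ∈ rest
    · have hne : k ≠ k' := fun h => hk' (h ▸ hmem)
      simp [hmem, PySem.Dict.getD_insert_of_ne d _ _ hne]
    · by_cases heq : k = k'
      · subst heq
        simp [hmem, PySem.Dict.getD_insert_self]
      · simp [hmem, heq, PySem.Dict.getD_insert_of_ne d _ _ heq]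

-- A's per-element sort loop: keys unchanged
lemma pvSortLoop_keys (ks : List Int) (d : PySem.Dict Int (List Int)) (hks : ∀ k ∈ ks, d.contains k = true) :
    (ks.foldl (fun dd key => dd.insert key (PySem.List.sorted (dd.getD key []) (fun x => x) false)) d).keys = d.keys := by
  induction ks generalizing d with
  | nil => rfl
  | cons k' rest ih =>
    simp only [List.foldl_cons]
    rw [ih]
    · exact PySem.Dict.keys_insert_of_contains _ _ (hks k' (by simp))
    · intro k hk
      rw [PySem.Dict.contains_insert]
      simp [hks k (List.mem_cons_of_mem _ hk)]

-- one loop iteration preserves the relation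
lemma pvStep_inv (dA dB : PySem.Dict Int (List Int)) (n inc minc : Int) (h : pvInv dA dB) :
    pvInv
      (if n < minc then dA
       else
        let value := PySem.Int.mod n inc
        let d' := if dA.contains value then dA.modify value [] (fun xs => xs ++ [n])
                  else dA.insert value [n]
        d'.keys.foldl (fun dd key => dd.insert key (PySem.List.sorted (dd.getD key []) (fun x => x) false)) d')
      (if minc ≤ n then dB.modify (PySem.Int.mod n inc) [] (fun xs => xs ++ [n]) else dB) := by
  obtain ⟨hkeys, hnd, hgetD⟩ := h
  by_cases hlt : n < minc
  · simp only [if_pos hlt, if_neg (not_le.mpr hlt)]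
    exact ⟨hkeys, hnd, hgetD⟩
  · have hge : minc ≤ n := le_of_not_gt hlt
    simp only [if_neg hlt, if_pos hge]
    set v := PySem.Int.mod n inc with hv
    set d' := if dA.contains v then dA.modify v [] (fun xs => xs ++ [n])
              else dA.insert v [n] with hd'
    set dB' := dB.modify v [] (fun xs => xs ++ [n]) with hdB'
    have hcon : dA.contains v = dB.contains v := by
      cases hc : dB.contains v
      · exact pvNotMem_contains_false dA v (by
          rw [hkeys]
          intro hm
          rw [(PySem.Dict.contains_iff_mem_keys dB v).mpr hm] at hc
          exact Bool.noConfusion hc)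
      · exact (PySem.Dict.contains_iff_mem_keys dA v).mpr
          (hkeys ▸ (PySem.Dict.contains_iff_mem_keys dB v).mp hc)
    have hkeysB' : dB'.keys = (dB.insert v (dB.getD v [] ++ [n])).keys :=
      PySem.Dict.keys_modify dB v [] (fun xs => xs ++ [n])
    have hd'keys : d'.keys = dB'.keys := by
      rw [hkeysB']
      cases hc : dB.contains v with
      | true =>
        rw [hd', hcon, hc, if_pos rfl]
        rw [PySem.Dict.keys_modify dA v [] (fun xs => xs ++ [n])]
        rw [PySem.Dict.keys_insert_of_contains _ _ (hcon.trans hc),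
            PySem.Dict.keys_insert_of_contains _ _ hc, hkeys]
      | false =>
        rw [hd', hcon, hc, if_neg (by simp)]
        rw [PySem.Dict.keys_insert_of_not_contains _ _ (hcon.trans hc),
            PySem.Dict.keys_insert_of_not_contains _ _ hc, hkeys]
    have hndB' : dB'.keys.Nodup := by
      rw [hkeysB']; exact PySem.Dict.nodup_keys_insert _ _ _ hnd
    have hd'nd : d'.keys.Nodup := hd'keys ▸ hndB'
    have hd'getD : ∀ k, d'.getD k [] = if k = v then dA.getD v [] ++ [n] else dA.getD k [] := by
      intro k
      cases hc : dA.contains v with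
      | true =>
        rw [hd', hc, if_pos rfl]
        exact PySem.Dict.getD_modify dA v k [] (fun xs => xs ++ [n])
      | false =>
        rw [hd', hc, if_neg (by simp)]
        by_cases heq : k = v
        · subst heq
          rw [PySem.Dict.getD_insert_self, if_pos rfl, PySem.Dict.getD_of_not_contains dA [] hc]
          rfl
        · rw [PySem.Dict.getD_insert_of_ne dA _ _ heq, if_neg heq]
    have hB'getD : ∀ k, dB'.getD k [] = if k = v then dB.getD v [] ++ [n] else dB.getD k [] := by
      intro k
      exact PySem.Dict.getD_modify dB v k [] (fun xs => xs ++ [n])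
    refine ⟨by rw [pvSortLoop_keys d'.keys d'
        (fun k hk => (PySem.Dict.contains_iff_mem_keys d' k).mpr hk), hd'keys], hndB', ?_⟩
    intro k
    rw [pvSortLoop_getD d'.keys d' hd'nd k, hB'getD k]
    by_cases hmem : k ∈ d'.keys
    · rw [if_pos hmem, hd'getD k]
      by_cases heq : k = v
      · rw [if_pos heq, if_pos heq, hgetD v]
        exact PySem.List.sorted_eq_sorted_of_perm _ _ _ (fun a b h => h)
          (List.Perm.append_right [n] (PySem.List.sorted_perm _ _ _))
      · rw [if_neg heq, if_neg heq, hgetD k]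
        exact PySem.List.sorted_sorted _ _
    · have hkB' : k ∉ dB'.keys := hd'keys ▸ hmem
      have hne : k ≠ v := by
        intro heq
        exact hkB' (heq ▸ (hkeysB' ▸ (PySem.Dict.mem_keys_insert dB v v _).mpr (Or.inl rfl)))
      rw [if_neg hmem, if_neg hne,
          PySem.Dict.getD_of_not_contains d' [] (pvNotMem_contains_false d' k hmem),
          PySem.Dict.getD_of_not_contains dB [] (pvNotMem_contains_false dB k
            (fun hm => hkB' (hkeysB' ▸ (PySem.Dict.mem_keys_insert dB v k _).mpr (Or.inr hm))))]
      rfl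

-- the whole loop preserves the relation
lemma pvFold_inv (l : List Int) (inc minc : Int) (dA dB : PySem.Dict Int (List Int)) (h : pvInv dA dB) :
    pvInv
      (l.foldl (fun d non_cyclable =>
        if non_cyclable < minc then d
        else
          let value := PySem.Int.mod non_cyclable inc
          let d' := if d.contains value then d.modify value [] (fun xs => xs ++ [non_cyclable])
                    else d.insert value [non_cyclable]
          d'.keys.foldl (fun dd key => dd.insert key (PySem.List.sorted (dd.getD key []) (fun x => x) false)) d') dA)
      (l.foldl (fun d n =>
        if minc ≤ n then d.modify (PySem.Int.mod n inc) [] (fun xs => xs ++ [n])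
        else d) dB) := by
  induction l generalizing dA dB with
  | nil => exact h
  | cons x xs ih =>
    simp only [List.foldl_cons]
    exact ih _ _ (pvStep_inv dA dB x inc minc h)

-- ===== VERDICT (by name: the statement is the Claim_ definition above) =====
theorem cleanup_non_cyclables_spec : Claim_equal_cleanup_non_cyclables := by
  intro ncs inc minc _ _
  simp only [Spec_cleanup_non_cyclables, cleanup_non_cyclables, cleanup_non_cyclables_alt]
  have h := pvFold_inv ncs inc minc PySem.Dict.empty PySem.Dict.empty
    ⟨rfl, PySem.Dict.nodup_keys_empty, fun k => by rw [PySem.Dict.getD_empty]; rfl⟩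
  obtain ⟨hkeys, hnd, hgetD⟩ := h
  rw [PySem.Dict.items_eq_map_keys _ (hkeys ▸ hnd) ([] : List Int),
      PySem.Dict.items_eq_map_keys _ hnd ([] : List Int), List.map_map, hkeys]
  exact List.map_congr_left (fun k _ => by simp only [Function.comp]; rw [hgetD k])
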